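-- pv_equiv track=rewrite | github.com/Lander37/Robot-Simulator | mapdescriptor.py | generateMapDescriptor2
-- ===== SOURCE A (Python) =====
-- def get_hex(ar):
--     """Get hex value of the binary map"""
--     current = 0
--     val = 8
--     ans = ''
--     if(len(ar) % 4 != 0):
--         return ""
--     for i in range(len(ar)):
--         current = current + val * ar[i]
--         val //= 2
--         if(val == 0):
--             ans = ans + hex(current)[2:]
--             val = 8
--             current = 0
--     return ans
--
-- def generateMapDescriptor2(maze):
--     """Generate map descriptor 2"""
--     length = 0
--     ans = []
--     for i in range(len(maze) - 1, -1, -1):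
--     # for i in range(len(maze)):
--         for j in range(len(maze[i])):
--             if(maze[i][j] == -1):
--                 continue
--             ans.append(maze[i][j])
--             length += 1
--     while(length % 4 != 0):
--         ans.append(0)
--         length += 1
--     return get_hex(ans)
-- ===== SOURCE B (Python) =====
-- def generateMapDescriptor2(maze):
--     """Generate map descriptor 2: stream rows through a carry buffer, emitting
--     a hex digit whenever four bits are available; no global flatten/pad pass."""
--     out = []
--     buf = []
--     for row in reversed(maze):
--         buf += [v for v in row if v != -1]
--         while len(buf) >= 4:
--             a, b, c, d = buf[:4]
--             out.append(hex(8*a + 4*b + 2*c + d)[2:])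
--             buf = buf[4:]
--     if buf:
--         a, b, c, d = (buf + [0, 0, 0])[:4]
--         out.append(hex(8*a + 4*b + 2*c + d)[2:])
--     return ''.join(out)
-- ===== Notes on version B (the rewrite author's own statement) =====
-- stated objective: alternative
-- what changed: B is a streaming encoder: it processes one row at a time through a carry buffer of at most three pending bits, emitting a hex digit as soon as four bits are available and finishing the final partial buffer with implicit zero padding, whereas A first materializes the whole flattened bit list, then runs a padding loop, then a separate per-element val/current state machine over it.
import Mathlib
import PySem

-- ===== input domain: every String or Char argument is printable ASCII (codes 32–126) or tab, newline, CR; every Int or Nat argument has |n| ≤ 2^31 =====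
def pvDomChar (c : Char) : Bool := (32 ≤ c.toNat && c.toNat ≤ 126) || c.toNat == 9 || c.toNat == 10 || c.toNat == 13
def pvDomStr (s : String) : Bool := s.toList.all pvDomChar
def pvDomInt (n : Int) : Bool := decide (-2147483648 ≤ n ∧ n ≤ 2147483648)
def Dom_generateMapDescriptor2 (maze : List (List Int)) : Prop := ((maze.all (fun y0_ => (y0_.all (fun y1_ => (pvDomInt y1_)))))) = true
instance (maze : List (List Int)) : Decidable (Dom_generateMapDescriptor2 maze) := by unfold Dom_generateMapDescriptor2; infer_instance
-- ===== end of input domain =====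

-- B is a streaming encoder (per-row carry buffer of pending bits, digit emitted per 4) instead of
-- A's flatten-then-pad-then-convert staging; objective: alternative.

-- hex(n)[2:] — Python's hex drops "0x"; for negative n, hex gives "-0x…" so [2:] keeps "x…". Exact for all Int.
def pyHexDrop2 (n : Int) : String :=
  if n < 0 then "x" ++ String.ofList (Nat.toDigits 16 n.natAbs)
  else String.ofList (Nat.toDigits 16 n.toNat)

-- ===== PORT A =====
def hexStep (st : Int × Int × String) (x : Int) : Int × Int × String :=
  if PySem.Int.floordiv st.2.1 2 == 0 then (0, 8, st.2.2 ++ pyHexDrop2 (st.1 + st.2.1 * x))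
  else (st.1 + st.2.1 * x, PySem.Int.floordiv st.2.1 2, st.2.2)

def getHex (ar : List Int) : String :=
  if ar.length % 4 ≠ 0 then ""
  else (ar.foldl hexStep (0, 8, "")).2.2

-- the while loop appends at most 3 zeros; fuel 4 is a totality guard only
def padLoop : Nat → List Int → Int → List Int
  | 0, ans, _ => ans
  | k + 1, ans, length =>
    if PySem.Int.mod length 4 ≠ 0 then padLoop k (ans ++ [0]) (length + 1) else ans

def padTo4 (ans : List Int) (length : Int) : List Int := padLoop 4 ans length

def generateMapDescriptor2 (maze : List (List Int)) : String :=
  let st := (PySem.List.pyRange ((maze.length : Int) - 1) (-1) (-1)).foldl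
    (fun (st : Int × List Int) i =>
      (PySem.List.pyGetD maze i []).foldl
        (fun (st : Int × List Int) x =>
          if x == -1 then st else (st.1 + 1, st.2 ++ [x])) st)
    (0, [])
  getHex (padTo4 st.2 st.1)

-- ===== PORT B =====
-- the inner 'while len(buf) >= 4' loop: emit digits from the front while four bits remain
def drainBuf : List Int → List String × List Int
  | a :: b :: c :: d :: r =>
    let p := drainBuf r
    (pyHexDrop2 (8*a + 4*b + 2*c + d) :: p.1, p.2)
  | l => ([], l)

def stepRow (st : List String × List Int) (row : List Int) : List String × List Int :=
  let buf := st.2 ++ row.filter (fun v => v != -1)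
  let p := drainBuf buf
  (st.1 ++ p.1, p.2)

-- 'a, b, c, d = (buf + [0,0,0])[:4]' — the catch-all arm is unreachable (buf is nonempty)
def lastDigit (buf : List Int) : String :=
  match (buf ++ [0, 0, 0]).take 4 with
  | a :: b :: c :: d :: _ => pyHexDrop2 (8*a + 4*b + 2*c + d)
  | _ => ""

def generateMapDescriptor2_alt (maze : List (List Int)) : String :=
  let st := maze.reverse.foldl stepRow ([], [])
  let out := if st.2.isEmpty then st.1 else st.1 ++ [lastDigit st.2]
  PySem.Str.join "" out

-- ===== PRECONDITION & SPEC =====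
def Spec_generateMapDescriptor2 (maze : List (List Int)) (out : String) : Prop := out = generateMapDescriptor2_alt maze
instance (maze : List (List Int)) (out : String) : Decidable (Spec_generateMapDescriptor2 maze out) := by unfold Spec_generateMapDescriptor2; infer_instance

-- ===== CLAIM (what is proved, stated in full; the proofs are below) =====
def Claim_equal_generateMapDescriptor2 : Prop := ∀ (maze : List (List Int)), Dom_generateMapDescriptor2 maze → Spec_generateMapDescriptor2 maze (generateMapDescriptor2 maze)

-- ===== LEMMAS AND PROOFS =====

-- common target of both ports: the hex digits of the 4-bit groups of a (padded) bit list
def hexChunksStr : List Int → String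
  | a :: b :: c :: d :: rest => pyHexDrop2 (8*a + 4*b + 2*c + d) ++ hexChunksStr rest
  | _ => ""

-- PySem.Int.mod for the fixed divisor 4, as Lean's emod
theorem pymod4 (a : Int) : PySem.Int.mod a 4 = a % 4 := by
  simp only [PySem.Int.mod]
  rw [Int.fmod_eq_emod]
  norm_num

theorem inner_fold_eq (row : List Int) (a : Int) (acc : List Int) :
    row.foldl (fun (st : Int × List Int) x =>
        if x == -1 then st else (st.1 + 1, st.2 ++ [x])) (a, acc)
      = (a + (row.filter (fun v => v != -1)).length, acc ++ row.filter (fun v => v != -1)) := by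
  induction row generalizing a acc with
  | nil => simp
  | cons x xs ih =>
    simp only [List.foldl_cons]
    by_cases hx : x = -1
    · rw [if_pos (by simp [hx]), ih, List.filter_cons_of_neg (by simp [hx])]
    · rw [if_neg (by simp [hx]), ih, List.filter_cons_of_pos (by simp [hx])]
      refine Prod.ext ?_ ?_
      · simp; ring
      · simp

theorem outer_fold_eq (l : List (List Int)) (a : Int) (acc : List Int) :
    l.foldl (fun (st : Int × List Int) row =>
        row.foldl (fun (st : Int × List Int) x =>
          if x == -1 then st else (st.1 + 1, st.2 ++ [x])) st) (a, acc)
      = (a + (l.flatMap (fun row => row.filter (fun v => v != -1))).length,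
         acc ++ l.flatMap (fun row => row.filter (fun v => v != -1))) := by
  induction l generalizing a acc with
  | nil => simp
  | cons r rs ih =>
    rw [List.foldl_cons, inner_fold_eq, ih, List.flatMap_cons]
    refine Prod.ext ?_ ?_
    · simp; ring
    · simp

theorem padLoop_eq (k : Nat) (ans : List Int) (n : Nat) (hk : (4 - n % 4) % 4 ≤ k) :
    padLoop k ans (n : Int) = ans ++ List.replicate ((4 - n % 4) % 4) 0 := by
  induction k generalizing ans n with
  | zero =>
    have : (4 - n % 4) % 4 = 0 := by omega
    simp [padLoop, this]
  | succ k ih =>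
    by_cases h : n % 4 = 0
    · have h0 : ¬ PySem.Int.mod (n : Int) 4 ≠ 0 := by rw [pymod4]; omega
      have : (4 - n % 4) % 4 = 0 := by omega
      rw [padLoop, if_neg h0, this]
      simp
    · have h4 : PySem.Int.mod (n : Int) 4 ≠ 0 := by rw [pymod4]; omega
      have hcast : ((n : Int) + 1) = ((n + 1 : Nat) : Int) := by push_cast; ring
      rw [padLoop, if_pos h4, hcast, ih (ans ++ [0]) (n + 1) (by omega)]
      have hrep : (4 - n % 4) % 4 = (4 - (n + 1) % 4) % 4 + 1 := by omega
      rw [hrep, List.replicate_succ]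
      simp

theorem padTo4_eq (ans : List Int) (n : Nat) :
    padTo4 ans (n : Int) = ans ++ List.replicate ((4 - n % 4) % 4) 0 := by
  rw [padTo4, padLoop_eq 4 ans n (by omega)]

theorem getHex_loop_eq (l : List Int) (h : l.length % 4 = 0) (acc : String) :
    (l.foldl hexStep (0, 8, acc)).2.2 = acc ++ hexChunksStr l := by
  match l with
  | [] => simp [hexChunksStr]
  | [a] => simp at h
  | [a, b] => simp at h
  | [a, b, c] => simp at h
  | a :: b :: c :: d :: rest =>
    have hr : rest.length % 4 = 0 := by simp at h; omega
    have s1 : hexStep (0, 8, acc) a = (8*a, 4, acc) := by simp [hexStep]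
    have s2 : hexStep (8*a, 4, acc) b = (8*a + 4*b, 2, acc) := by simp [hexStep]
    have s3 : hexStep (8*a + 4*b, 2, acc) c = (8*a + 4*b + 2*c, 1, acc) := by
      simp [hexStep]
    have s4 : hexStep (8*a + 4*b + 2*c, 1, acc) d
        = (0, 8, acc ++ pyHexDrop2 (8*a + 4*b + 2*c + d)) := by simp [hexStep]
    rw [List.foldl_cons, s1, List.foldl_cons, s2, List.foldl_cons, s3, List.foldl_cons, s4]
    rw [getHex_loop_eq rest hr, hexChunksStr]
    simp [String.append_assoc]

-- A's port equals the chunk characterization of the padded flattened bit list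
theorem A_eq_chunks (maze : List (List Int)) :
    generateMapDescriptor2 maze
      = hexChunksStr
          ((maze.reverse.flatMap (fun row => row.filter (fun v => v != -1)))
            ++ List.replicate
                 ((4 - (maze.reverse.flatMap (fun row => row.filter (fun v => v != -1))).length % 4) % 4) 0) := by
  unfold generateMapDescriptor2
  set bits := maze.reverse.flatMap (fun row => row.filter (fun v => v != -1)) with hbits
  have houter : (PySem.List.pyRange ((maze.length : Int) - 1) (-1) (-1)).foldl
      (fun (st : Int × List Int) i =>
        (PySem.List.pyGetD maze i []).foldl
          (fun (st : Int × List Int) x =>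
            if x == -1 then st else (st.1 + 1, st.2 ++ [x])) st)
      (0, []) = ((bits.length : Int), bits) := by
    rw [PySem.List.pyRange_neg_one_eq_reverse]
    have h01 : ((-1 : Int) + 1) = 0 := by ring
    have h02 : ((maze.length : Int) - 1 + 1) = (maze.length : Int) := by ring
    rw [h01, h02]
    rw [← List.foldl_map (f := fun i => PySem.List.pyGetD maze i ([] : List Int))]
    rw [List.map_reverse, PySem.List.map_pyGetD_pyRange_zero']
    simpa [hbits] using outer_fold_eq maze.reverse 0 []
  rw [houter]
  simp only
  rw [padTo4_eq bits bits.length]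
  set padded := bits ++ List.replicate ((4 - bits.length % 4) % 4) 0 with hpadded
  have hlen : padded.length % 4 = 0 := by simp [hpadded]; omega
  unfold getHex
  rw [if_neg (by omega)]
  rw [getHex_loop_eq padded hlen ""]
  simp

-- ---------- B side ----------

-- finishing a (short) leftover buffer
def finalize (buf : List Int) : String :=
  if buf.isEmpty then "" else lastDigit buf

-- the leftover of a drain is already drained
theorem drainBuf_idem (l : List Int) : drainBuf (drainBuf l).2 = ([], (drainBuf l).2) := by
  fun_induction drainBuf l with
  | case1 a b c d r p ih => simpa [drainBuf] using ih
  | case2 l h => simp [drainBuf]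

-- draining is compositional: drain the prefix, then the leftover plus the suffix
theorem drainBuf_append (xs ys : List Int) :
    drainBuf (xs ++ ys)
      = ((drainBuf xs).1 ++ (drainBuf ((drainBuf xs).2 ++ ys)).1,
         (drainBuf ((drainBuf xs).2 ++ ys)).2) := by
  fun_induction drainBuf xs with
  | case1 a b c d r p ih =>
    simp only [List.cons_append, drainBuf] at *
    rw [ih]
  | case2 l h =>
    simp

-- invariant of the row fold: the state is always (digits so far, drained leftover)
theorem fold_stepRow_eq (rows : List (List Int)) (out : List String) (buf : List Int)
    (hbuf : drainBuf buf = ([], buf)) :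
    rows.foldl stepRow (out, buf)
      = (out ++ (drainBuf (buf ++ rows.flatMap (fun row => row.filter (fun v => v != -1)))).1,
         (drainBuf (buf ++ rows.flatMap (fun row => row.filter (fun v => v != -1)))).2) := by
  induction rows generalizing out buf with
  | nil => simp [hbuf]
  | cons r rs ih =>
    rw [List.foldl_cons]
    have hstep : stepRow (out, buf) r
        = (out ++ (drainBuf (buf ++ r.filter (fun v => v != -1))).1,
           (drainBuf (buf ++ r.filter (fun v => v != -1))).2) := rfl
    rw [hstep, ih _ _ (drainBuf_idem _)]
    rw [List.flatMap_cons, ← List.append_assoc, drainBuf_append (buf ++ r.filter (fun v => v != -1))]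
    simp

-- concatenating the drained digits and finishing the leftover yields the padded chunk string
theorem drain_finalize_eq (l : List Int) :
    List.foldr (· ++ ·) "" (drainBuf l).1 ++ finalize (drainBuf l).2
      = hexChunksStr (l ++ List.replicate ((4 - l.length % 4) % 4) 0) := by
  fun_induction drainBuf l with
  | case1 a b c d r p ih =>
    have hmod : (4 - (a :: b :: c :: d :: r).length % 4) % 4 = (4 - r.length % 4) % 4 := by
      simp; omega
    simp only [hmod, List.cons_append, hexChunksStr, List.foldr_cons]
    rw [← ih, String.append_assoc]
  | case2 l h =>
    match l with
    | [] => simp [finalize, hexChunksStr]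
    | [a] =>
      show "" ++ finalize [a] = hexChunksStr [a, 0, 0, 0]
      simp [finalize, lastDigit, hexChunksStr]
    | [a, b] =>
      show "" ++ finalize [a, b] = hexChunksStr [a, b, 0, 0]
      simp [finalize, lastDigit, hexChunksStr]
    | [a, b, c] =>
      show "" ++ finalize [a, b, c] = hexChunksStr [a, b, c, 0]
      simp [finalize, lastDigit, hexChunksStr]
    | a :: b :: c :: d :: r => exact absurd rfl (h a b c d r)

-- ''.join is concatenation
theorem foldr_append_str (l : List String) (s : String) :
    List.foldr (· ++ ·) s l = List.foldr (· ++ ·) "" l ++ s := by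
  induction l with
  | nil => simp
  | cons x t ih => simp [ih, String.append_assoc]

theorem join_empty_eq (l : List String) : PySem.Str.join "" l = List.foldr (· ++ ·) "" l := by
  induction l with
  | nil => rfl
  | cons s t ih =>
    cases t with
    | nil => simp [PySem.Str.join, PySem.Chars.join, List.intercalate]
    | cons u t' =>
      have h0 : ("" : String).toList = [] := rfl
      simp only [PySem.Str.join, PySem.Chars.join, List.map_cons, List.intercalate,
        List.intersperse, List.flatten, h0, List.append_eq, List.nil_append] at *
      rw [String.ofList_append, ih, List.foldr_cons]
      simp

theorem B_eq_chunks (maze : List (List Int)) :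
    generateMapDescriptor2_alt maze
      = hexChunksStr
          ((maze.reverse.flatMap (fun row => row.filter (fun v => v != -1)))
            ++ List.replicate
                 ((4 - (maze.reverse.flatMap (fun row => row.filter (fun v => v != -1))).length % 4) % 4) 0) := by
  unfold generateMapDescriptor2_alt
  set bits := maze.reverse.flatMap (fun row => row.filter (fun v => v != -1)) with hbits
  rw [fold_stepRow_eq maze.reverse [] [] rfl]
  simp only [List.nil_append, ← hbits]
  rw [join_empty_eq, ← drain_finalize_eq bits]
  by_cases hb : (drainBuf bits).2.isEmpty
  · rw [if_pos hb]
    have : finalize (drainBuf bits).2 = "" := by simp [finalize, hb]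
    simp [this]
  · rw [if_neg hb]
    have : finalize (drainBuf bits).2 = lastDigit (drainBuf bits).2 := by simp [finalize, hb]
    rw [this, List.foldr_append]
    simp only [List.foldr_cons, List.foldr_nil, String.append_empty]
    exact foldr_append_str _ _

-- ===== VERDICT (by name: the statement is the Claim_ definition above) =====
theorem generateMapDescriptor2_spec : Claim_equal_generateMapDescriptor2 := by
  unfold Claim_equal_generateMapDescriptor2
  intro maze _
  unfold Spec_generateMapDescriptor2
  rw [A_eq_chunks, B_eq_chunks]
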